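-- pv_equiv track=rewrite | github.com/HyperionGray/metasploit-framework-pynative | scripts/meterpreter/hashdump.py | decode_windows_hint
-- ===== SOURCE A (Python) =====
-- def decode_windows_hint(e_string):
--     """
--     Decode Windows password hint
--
--     Args:
--         e_string: Encoded hex string
--
--     Returns:
--         Decoded string
--     """
--     d_string = ""
--     chunks = [e_string[i:i+4] for i in range(0, len(e_string), 4)]
--     for chunk in chunks:
--         if len(chunk) == 4:
--             bytes_arr = [chunk[i:i+2] for i in range(0, len(chunk), 2)]
--             d_string += chr(int(bytes_arr[1] + bytes_arr[0], 16))
--     return d_string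
-- ===== SOURCE B (Python) =====
-- _HEX = {c: v for v, c in enumerate('0123456789abcdef')}
-- for _v, _c in enumerate('ABCDEF'):
--     _HEX[_c] = 10 + _v
--
-- # nibble weight by position within a 4-hex-digit chunk "c1 c2 c3 c4":
-- # the chunk decodes to the UTF-16 code unit v3*4096 + v4*256 + v1*16 + v2
-- _WEIGHT = (16, 1, 4096, 256)
--
--
-- def decode_windows_hint(e_string):
--     """
--     Decode Windows password hint
--
--     Args:
--         e_string: Encoded hex string
--
--     Returns:
--         Decoded string
--     """
--     out = []
--     val = 0
--     i = 0
--     for ch in e_string[:len(e_string) // 4 * 4]: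
--         val += _HEX[ch] * _WEIGHT[i]
--         if i == 3:
--             out.append(chr(val))
--             val = 0
--             i = 0
--         else:
--             i += 1
--     return ''.join(out)
-- ===== Notes on version B (the rewrite author's own statement) =====
-- stated objective: alternative
-- what changed: Replaces A's chunk-list construction (4-char substring slicing, inner 2-char re-slicing, swapped hex concatenation and int(...,16) per chunk) with a single streaming pass over the characters: a table-driven finite-state accumulator that adds each nibble's value times a per-position weight (16,1,4096,256) and emits a character every fourth nibble, so no substrings are ever built.
-- outside the precondition, e.g. on decode_windows_hint('ab c'): A returns 'ಫ', B raises KeyError; on decode_windows_hint('_123'): A returns 'ȱ', B raises KeyError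
import Mathlib
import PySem

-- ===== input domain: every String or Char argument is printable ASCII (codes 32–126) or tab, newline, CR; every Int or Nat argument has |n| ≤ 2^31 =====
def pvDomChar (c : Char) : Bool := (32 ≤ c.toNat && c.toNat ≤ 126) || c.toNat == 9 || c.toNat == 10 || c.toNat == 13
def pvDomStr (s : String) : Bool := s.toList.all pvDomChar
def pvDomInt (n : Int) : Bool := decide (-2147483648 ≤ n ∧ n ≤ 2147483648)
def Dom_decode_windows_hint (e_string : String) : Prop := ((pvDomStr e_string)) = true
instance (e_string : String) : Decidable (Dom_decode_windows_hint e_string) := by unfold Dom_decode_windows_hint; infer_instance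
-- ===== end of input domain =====

-- B replaces A's chunk slicing / swapped-hex concatenation / int(...,16) by one streaming pass:
-- a table-driven nibble accumulator with per-position weights, emitting a char every 4th nibble;
-- objective: alternative (equal cost, no substrings built).

-- ===== PORT A =====

-- value of a single hex digit; exact for '0'-'9','a'-'f','A'-'F' (guaranteed by Pre_)
def pvHexVal (c : Char) : Nat :=
  if 97 ≤ c.toNat then c.toNat - 87 else if 65 ≤ c.toNat then c.toNat - 55 else c.toNat - 48

-- port of int(x, 16); exact when x consists solely of hex digits (guaranteed by Pre_)
def pvIntHex (l : List Char) : Nat := l.foldl (fun n c => 16 * n + pvHexVal c) 0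

-- port of chr(n); exact when n is a valid scalar value (Pre_ excludes lone-surrogate chunks)
def pvChr (n : Nat) : String := String.ofList [Char.ofNat n]

def decode_windows_hint (e_string : String) : String :=
  let chunks := (PySem.List.pyRange 0 (PySem.Str.len e_string) 4).map
    (fun i => PySem.Str.slice e_string (some i) (some (i + 4)))
  chunks.foldl
    (fun d_string chunk =>
      if PySem.Str.len chunk = 4 then
        let bytes_arr := (PySem.List.pyRange 0 (PySem.Str.len chunk) 2).map
          (fun i => PySem.Str.slice chunk (some i) (some (i + 2)))
        d_string ++ pvChr (pvIntHex (PySem.List.pyGetD bytes_arr 1 "" ++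
                                     PySem.List.pyGetD bytes_arr 0 "").toList)
      else d_string)
    ""

-- ===== PORT B =====

-- port of the tuple indexing _WEIGHT[i]; i is always 0..3 in B's loop
def pvWeight (i : Nat) : Nat := [16, 1, 4096, 256].getD i 0

-- B's loop body: state (out, val, i), one character at a time
def pvStepB (st : List Char × Nat × Nat) (ch : Char) : List Char × Nat × Nat :=
  let out := st.1
  let val := st.2.1 + pvHexVal ch * pvWeight st.2.2  -- _HEX[ch]: the dict lookup, exact for hex digits (Pre_)
  if st.2.2 = 3 then (out ++ [Char.ofNat val], 0, 0) else (out, val, st.2.2 + 1)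

def decode_windows_hint_alt (e_string : String) : String :=
  let pre := PySem.Str.slice e_string none
    (some (PySem.Int.floordiv (PySem.Str.len e_string) 4 * 4))
  let st := pre.toList.foldl pvStepB ([], 0, 0)
  String.ofList st.1

-- ===== PRECONDITION & SPEC =====

def pvIsHexDigit (c : Char) : Bool :=
  (48 ≤ c.toNat && c.toNat ≤ 57) || (97 ≤ c.toNat && c.toNat ≤ 102) ||
  (65 ≤ c.toNat && c.toNat ≤ 70)

def pvOkChunk (c1 c2 c3 c4 : Char) : Bool :=
  pvIsHexDigit c1 && pvIsHexDigit c2 && pvIsHexDigit c3 && pvIsHexDigit c4 &&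
  !((c3 == 'd' || c3 == 'D') && 8 ≤ pvHexVal c4)

def pvOkChunks : List Char → Bool
  | c1 :: c2 :: c3 :: c4 :: rest => pvOkChunk c1 c2 c3 c4 && pvOkChunks rest
  | _ => true  -- a trailing incomplete chunk is dropped by both programs, so it is unconstrained

-- Pre_ excludes (a) inputs whose complete 4-char chunks contain a non-hex-digit character —
-- there A usually raises ValueError, though int()'s tolerance of '_'/space/'+' after the byte
-- swap lets a few such inputs return an accidental value that B (a hex-digit dict) rejects
-- with KeyError — and (b) chunks decoding to lone UTF-16 surrogates (U+D800..U+DFFF), values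
-- chr() produces in Python but which are not representable as a Lean Char.
def Pre_decode_windows_hint (e_string : String) : Prop := pvOkChunks e_string.toList = true
instance (e_string : String) : Decidable (Pre_decode_windows_hint e_string) := by
  unfold Pre_decode_windows_hint; infer_instance

def pvWitness_decode_windows_hint : String := "41004200cc"

def Spec_decode_windows_hint (e_string : String) (out : String) : Prop := out = decode_windows_hint_alt e_string
instance (e_string : String) (out : String) : Decidable (Spec_decode_windows_hint e_string out) := by unfold Spec_decode_windows_hint; infer_instance

-- ===== CLAIM (what is proved, stated in full; the proofs are below) =====
def Claim_equal_decode_windows_hint : Prop := ∀ (e_string : String), Dom_decode_windows_hint e_string → Pre_decode_windows_hint e_string → Spec_decode_windows_hint e_string (decode_windows_hint e_string)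

-- ===== LEMMAS AND PROOFS =====

-- the decoded characters of a (multiple-of-4-length) hex-digit list, 4 at a time
def pvDecode4 : List Char → List Char
  | c1 :: c2 :: c3 :: c4 :: rest =>
      Char.ofNat (pvHexVal c1 * 16 + pvHexVal c2 * 1 + pvHexVal c3 * 4096
        + pvHexVal c4 * 256) :: pvDecode4 rest
  | _ => []

lemma pvPyRange4_cons (a b : Int) (h : a < b) :
    PySem.List.pyRange a b 4 = a :: PySem.List.pyRange (a + 4) b 4 := by
  rw [PySem.List.pyRange_of_pos _ _ (by norm_num), PySem.List.pyRange_of_pos _ _ (by norm_num)]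
  rw [if_pos h]
  have hN : ((b - a + 4 - 1) / 4).toNat
      = (if a + 4 < b then ((b - (a + 4) + 4 - 1) / 4).toNat else 0) + 1 := by
    split_ifs with h2 <;> omega
  rw [hN, List.range_succ_eq_map, List.map_cons, List.map_map]
  refine congrArg₂ List.cons (by simp) (List.map_congr_left ?_)
  intro k _
  simp [Nat.succ_eq_add_one]
  ring

lemma pvPyRange4_nil (a b : Int) (h : b ≤ a) : PySem.List.pyRange a b 4 = [] := by
  rw [PySem.List.pyRange_of_pos _ _ (by norm_num), if_neg (by omega)]
  simp

-- the list of chunks A builds, as a structural recursion over the character list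
def pvChunks4 : List Char → List String
  | c1 :: c2 :: c3 :: c4 :: rest => String.ofList [c1, c2, c3, c4] :: pvChunks4 rest
  | [] => []
  | rest => [String.ofList rest]

lemma pvChunks4_long (l : List Char) (h : 4 ≤ l.length) :
    pvChunks4 l = String.ofList (l.take 4) :: pvChunks4 (l.drop 4) := by
  match l with
  | c1 :: c2 :: c3 :: c4 :: rest => simp [pvChunks4]
  | [] | [_] | [_, _] | [_, _, _] => simp at h

lemma pvChunks4_short (t : List Char) (h1 : t ≠ []) (h3 : t.length ≤ 3) :
    pvChunks4 t = [String.ofList t] := by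
  match t with
  | [a] => rfl
  | [a, b] => rfl
  | [a, b, c] => rfl
  | [] => simp at h1
  | _ :: _ :: _ :: _ :: _ => simp at h3; omega

lemma pvChunksA_eq (s : String) (j : Nat) :
    (PySem.List.pyRange (j : Int) (PySem.Str.len s) 4).map
      (fun i => PySem.Str.slice s (some i) (some (i + 4)))
    = pvChunks4 (s.toList.drop j) := by
  have hlen : PySem.Str.len s = (s.toList.length : Int) := by simp [PySem.Str.len]
  by_cases hj : j < s.toList.length
  · have hslice : PySem.Str.slice s (some (j : Int)) (some ((j : Int) + 4))
        = String.ofList ((s.toList.drop j).take 4) := by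
      apply String.toList_injective
      rw [PySem.Str.toList_slice]
      have : ((j : Int) + 4) = ((j : Int) + ((4 : Nat) : Int)) := by norm_num
      simp [this, PySem.List.slice_natCast_add]
    rw [hlen, pvPyRange4_cons _ _ (by exact_mod_cast hj), List.map_cons, hslice]
    by_cases h4 : j + 4 ≤ s.toList.length
    · have hcast : ((j : Int) + 4) = (((j + 4 : Nat)) : Int) := by push_cast; ring
      rw [hcast, ← hlen, pvChunksA_eq s (j + 4)]
      rw [pvChunks4_long (s.toList.drop j) (by rw [List.length_drop]; omega)]
      rw [List.drop_drop]
    · have hnil : PySem.List.pyRange ((j : Int) + 4) ((s.toList.length : Int)) 4 = [] :=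
        pvPyRange4_nil _ _ (by omega)
      rw [hnil, List.map_nil]
      have htail3 : (s.toList.drop j).length ≤ 3 := by rw [List.length_drop]; omega
      have hne : s.toList.drop j ≠ [] := by
        intro h0
        have h0' : (s.toList.drop j).length = 0 := by rw [h0]; rfl
        rw [List.length_drop] at h0'; omega
      rw [List.take_of_length_le (by omega), pvChunks4_short _ hne htail3]
  · rw [hlen, pvPyRange4_nil _ _ (by omega), List.map_nil,
        List.drop_of_length_le (by omega)]
    rfl
termination_by s.toList.length - j
decreasing_by
  have hsl : s.toList.length = s.length := by simp
  omega

lemma pvOfList_append (a b : List Char) :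
    String.ofList a ++ String.ofList b = String.ofList (a ++ b) := by simp

-- A's fold over the chunk list produces exactly the 4-at-a-time decode of the complete prefix
lemma pvFoldA_eq (l : List Char) (acc : List Char) :
    (pvChunks4 l).foldl
      (fun d_string chunk =>
        if PySem.Str.len chunk = 4 then
          d_string ++ pvChr (pvIntHex (PySem.List.pyGetD
              ((PySem.List.pyRange 0 (PySem.Str.len chunk) 2).map
                (fun i => PySem.Str.slice chunk (some i) (some (i + 2)))) 1 "" ++
            PySem.List.pyGetD
              ((PySem.List.pyRange 0 (PySem.Str.len chunk) 2).map
                (fun i => PySem.Str.slice chunk (some i) (some (i + 2)))) 0 "").toList)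
        else d_string)
      (String.ofList acc)
    = String.ofList (acc ++ pvDecode4 (l.take (l.length - l.length % 4))) := by
  match l with
  | c1 :: c2 :: c3 :: c4 :: rest =>
    rw [pvChunks4]
    rw [List.foldl_cons]
    have hchunklen : PySem.Str.len (String.ofList [c1, c2, c3, c4]) = 4 := by
      simp [PySem.Str.len]
    rw [if_pos hchunklen, hchunklen]
    have hr2 : PySem.List.pyRange 0 4 2 = [0, 2] := by decide
    rw [hr2]
    have hs0 : PySem.Str.slice (String.ofList [c1, c2, c3, c4]) (some 0) (some (0 + 2))
        = String.ofList [c1, c2] := by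
      apply String.toList_injective
      rw [PySem.Str.toList_slice]
      simp only [PySem.Chars.slice_eq_listSlice]
      rw [show ((0 : Int) + 2) = (((0 : Nat) : Int) + ((2 : Nat) : Int)) by norm_num,
          show (some (0 : Int)) = some ((0 : Nat) : Int) from rfl,
          PySem.List.slice_natCast_add]
      simp
    have hs2 : PySem.Str.slice (String.ofList [c1, c2, c3, c4]) (some 2) (some (2 + 2))
        = String.ofList [c3, c4] := by
      apply String.toList_injective
      rw [PySem.Str.toList_slice]
      simp only [PySem.Chars.slice_eq_listSlice]
      rw [show ((2 : Int) + 2) = (((2 : Nat) : Int) + ((2 : Nat) : Int)) by norm_num,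
          show (some (2 : Int)) = some (((2 : Nat) : Int)) by norm_num,
          PySem.List.slice_natCast_add]
      simp
    rw [List.map_cons, List.map_cons, List.map_nil, hs0, hs2]
    have hcat : (String.ofList [c3, c4] ++ String.ofList [c1, c2]).toList
        = [c3, c4, c1, c2] := by
      rw [pvOfList_append]; simp
    rw [show PySem.List.pyGetD [String.ofList [c1, c2], String.ofList [c3, c4]] 1 ""
          = String.ofList [c3, c4] by simp [PySem.List.pyGetD, PySem.List.pyGet?, PySem.List.pyIdx?],
        show PySem.List.pyGetD [String.ofList [c1, c2], String.ofList [c3, c4]] 0 ""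
          = String.ofList [c1, c2] by simp [PySem.List.pyGetD, PySem.List.pyGet?, PySem.List.pyIdx?],
        hcat]
    rw [show String.ofList acc ++ pvChr (pvIntHex [c3, c4, c1, c2])
          = String.ofList (acc ++ [Char.ofNat (pvIntHex [c3, c4, c1, c2])]) by
        rw [pvChr, pvOfList_append]]
    rw [pvFoldA_eq rest (acc ++ [Char.ofNat (pvIntHex [c3, c4, c1, c2])])]
    have hlen4 : (c1 :: c2 :: c3 :: c4 :: rest).length = rest.length + 4 := by simp
    have hmod : (c1 :: c2 :: c3 :: c4 :: rest).length
        - (c1 :: c2 :: c3 :: c4 :: rest).length % 4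
        = (rest.length - rest.length % 4) + 4 := by
      rw [hlen4]; omega
    rw [hmod]
    have htake : (c1 :: c2 :: c3 :: c4 :: rest).take ((rest.length - rest.length % 4) + 4)
        = c1 :: c2 :: c3 :: c4 :: rest.take (rest.length - rest.length % 4) := by
      rfl
    rw [htake]
    have hval : pvIntHex [c3, c4, c1, c2]
        = pvHexVal c1 * 16 + pvHexVal c2 * 1 + pvHexVal c3 * 4096 + pvHexVal c4 * 256 := by
      simp [pvIntHex, List.foldl]; ring
    rw [show pvDecode4 (c1 :: c2 :: c3 :: c4 :: rest.take (rest.length - rest.length % 4))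
          = Char.ofNat (pvHexVal c1 * 16 + pvHexVal c2 * 1 + pvHexVal c3 * 4096
              + pvHexVal c4 * 256)
              :: pvDecode4 (rest.take (rest.length - rest.length % 4)) from rfl]
    rw [List.append_assoc, List.singleton_append, hval]
  | [] => simp [pvChunks4, pvDecode4]
  | [a] => simp [pvChunks4, pvDecode4, PySem.Str.len]
  | [a, b] => simp [pvChunks4, pvDecode4, PySem.Str.len]
  | [a, b, c] => simp [pvChunks4, pvDecode4, PySem.Str.len]

-- B's character-at-a-time fold, started at nibble position 0, consumes a multiple-of-4-length
-- list and appends exactly the 4-at-a-time decode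
lemma pvFoldB_eq (l : List Char) (h : l.length % 4 = 0) (acc : List Char) :
    l.foldl pvStepB (acc, 0, 0) = (acc ++ pvDecode4 l, 0, 0) := by
  match l with
  | c1 :: c2 :: c3 :: c4 :: rest =>
    have h' : rest.length % 4 = 0 := by simp at h; omega
    have hstep : (c1 :: c2 :: c3 :: c4 :: rest).foldl pvStepB (acc, 0, 0)
        = rest.foldl pvStepB
            (acc ++ [Char.ofNat (pvHexVal c1 * 16 + pvHexVal c2 * 1 + pvHexVal c3 * 4096
              + pvHexVal c4 * 256)], 0, 0) := by
      simp only [List.foldl_cons, pvStepB, pvWeight]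
      norm_num
    rw [hstep, pvFoldB_eq rest h']
    rw [show pvDecode4 (c1 :: c2 :: c3 :: c4 :: rest)
          = Char.ofNat (pvHexVal c1 * 16 + pvHexVal c2 * 1 + pvHexVal c3 * 4096
              + pvHexVal c4 * 256) :: pvDecode4 rest from rfl]
    rw [List.append_assoc, List.singleton_append]
  | [] => simp [pvDecode4]
  | [a] => simp at h
  | [a, b] => simp at h
  | [a, b, c] => simp at h

-- ===== VERDICT (by name: the statement is the Claim_ definition above) =====
theorem decode_windows_hint_spec : Claim_equal_decode_windows_hint := by
  intro s _hdom _hpre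
  unfold Spec_decode_windows_hint decode_windows_hint decode_windows_hint_alt
  dsimp only
  have hchunks := pvChunksA_eq s 0
  simp only [Nat.cast_zero, List.drop_zero] at hchunks
  rw [hchunks]
  have hfoldA := pvFoldA_eq s.toList []
  simp only [List.nil_append] at hfoldA
  rw [show ("" : String) = String.ofList [] from rfl, hfoldA]
  -- B's side
  set N := s.toList.length - s.toList.length % 4 with hN
  have hlen : PySem.Str.len s = (s.toList.length : Int) := by simp [PySem.Str.len]
  have hn : PySem.Int.floordiv (PySem.Str.len s) 4 * 4 = ((N : Nat) : Int) := by
    rw [hlen]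
    rw [show ((4 : Int)) = ((4 : Nat) : Int) from rfl, PySem.Int.floordiv_natCast]
    push_cast
    omega
  rw [hn]
  have hslice : (PySem.Str.slice s none (some ((N : Nat) : Int))).toList
      = s.toList.take N := by
    rw [PySem.Str.toList_slice]
    simp [PySem.List.slice_to_natCast]
  rw [hslice]
  have hmod : (s.toList.take N).length % 4 = 0 := by
    rw [List.length_take]; omega
  rw [pvFoldB_eq _ hmod []]
  simp
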